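-- pv_equiv track=rewrite | github.com/team2or/stcode | ljk/20220622.py | solution
-- ===== SOURCE A (Python) =====
-- def solution(lottos, win_nums):
--     answer = []
--     cnt = 0
--     luck_cnt = 0
--     for lotto in lottos:
--         if lotto == 0:
--             cnt += 1
--         elif lotto in win_nums:
--             luck_cnt += 1
--     award = dict()
--     for i in range(6):
--         award[i+1] = 6-i
--     award[0] = 6
--     return [award[cnt+luck_cnt], award[luck_cnt] ]
-- ===== SOURCE B (Python) =====
-- def solution(lottos, win_nums):
--     winners = set(win_nums)
--     matches = sum(lottos.count(v) for v in winners if v != 0)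
--     losers = [x for x in lottos if x != 0 and x not in winners]
--     return [min(6, 7 - (len(lottos) - len(losers))), min(6, 7 - matches)]
-- ===== Notes on version B (the rewrite author's own statement) =====
-- stated objective: alternative
-- what changed: Drops the award dict and the per-lotto counting loop: B sums lottos.count(v) over the distinct winning numbers, gets the total hit count by complement (len(lottos) minus the losing tickets), and ranks with the closed form min(6, 7 - m).
import Mathlib
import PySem

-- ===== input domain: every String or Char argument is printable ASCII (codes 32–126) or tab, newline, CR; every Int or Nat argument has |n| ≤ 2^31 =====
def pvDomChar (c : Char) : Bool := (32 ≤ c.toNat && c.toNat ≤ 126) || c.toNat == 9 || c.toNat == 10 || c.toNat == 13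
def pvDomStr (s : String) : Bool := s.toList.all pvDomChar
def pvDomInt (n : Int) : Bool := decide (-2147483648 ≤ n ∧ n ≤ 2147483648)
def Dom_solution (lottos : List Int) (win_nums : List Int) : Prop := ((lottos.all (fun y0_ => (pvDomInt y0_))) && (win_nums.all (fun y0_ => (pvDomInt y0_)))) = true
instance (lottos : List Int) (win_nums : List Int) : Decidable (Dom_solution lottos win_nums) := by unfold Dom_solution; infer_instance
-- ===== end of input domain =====

-- B sums lottos.count(v) over the distinct winning numbers and counts hits by complement, ranking with the closed form min(6, 7 - m) instead of A's award dict; objective: alternative.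


-- ===== PORT A =====
-- the loop: if lotto == 0: cnt += 1 elif lotto in win_nums: luck_cnt += 1
def solutionLoop (win_nums : List Int) (st : Int × Int) (lotto : Int) : Int × Int :=
  if lotto = 0 then (st.1 + 1, st.2)
  else if win_nums.contains lotto then (st.1, st.2 + 1)
  else st

-- award = dict(); for i in range(6): award[i+1] = 6-i; award[0] = 6
def awardDict : PySem.Dict Int Int :=
  ((PySem.List.pyRange 0 6 1).foldl (fun d i => d.insert (i + 1) (6 - i)) (PySem.Dict.empty)).insert 0 6

-- award[k] raises KeyError on a missing key; get? returns none there, excluded by Pre_; .getD 0 only totalises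
def solution (lottos : List Int) (win_nums : List Int) : List Int :=
  let st := lottos.foldl (solutionLoop win_nums) (0, 0)
  [((awardDict.get? (st.1 + st.2)).getD 0), ((awardDict.get? st.2).getD 0)]

-- ===== PORT B =====
def solution_alt (lottos : List Int) (win_nums : List Int) : List Int :=
  let winners : PySem.Set Int := PySem.Set.ofList win_nums
  -- sum over the set is order-independent, so consuming the Set's elements here is exact
  let matched : Int := (winners.filter (fun v => v ≠ 0)).foldl (fun acc v => acc + PySem.List.count lottos v) 0
  let losers : List Int := lottos.filter (fun x => x ≠ 0 ∧ ¬ winners.contains x)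
  [min 6 (7 - ((lottos.length : Int) - losers.length)), min 6 (7 - matched)]

-- ===== PRECONDITION & SPEC =====
-- Pre_ excludes exactly the inputs where A raises KeyError: more than 6 elements of lottos counted (zeros plus non-zero winners)
def Pre_solution (lottos : List Int) (win_nums : List Int) : Prop :=
  lottos.countP (fun x => x == 0) + lottos.countP (fun x => x != 0 && win_nums.contains x) ≤ 6
instance (lottos : List Int) (win_nums : List Int) : Decidable (Pre_solution lottos win_nums) := by unfold Pre_solution; infer_instance
def pvWitness_solution : List Int × List Int := ([8, 19, 3, 0], [8, 3, 27, 19, 22, 45])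

def Spec_solution (lottos : List Int) (win_nums : List Int) (out : List Int) : Prop := out = solution_alt lottos win_nums
instance (lottos : List Int) (win_nums : List Int) (out : List Int) : Decidable (Spec_solution lottos win_nums out) := by unfold Spec_solution; infer_instance

-- ===== CLAIM (what is proved, stated in full; the proofs are below) =====
def Claim_equal_solution : Prop := ∀ (lottos : List Int) (win_nums : List Int), Dom_solution lottos win_nums → Pre_solution lottos win_nums → Spec_solution lottos win_nums (solution lottos win_nums)

-- ===== LEMMAS AND PROOFS =====

-- A's loop computes the two counts
theorem solutionLoop_counts (win_nums : List Int) (lottos : List Int) (c l : Int) :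
    lottos.foldl (solutionLoop win_nums) (c, l)
      = (c + (lottos.countP (fun x => x == 0) : Int),
         l + (lottos.countP (fun x => x != 0 && win_nums.contains x) : Int)) := by
  induction lottos generalizing c l with
  | nil => simp
  | cons x xs ih =>
    simp only [List.foldl_cons, solutionLoop]
    split_ifs with hx hm
    · rw [ih]; simp [List.countP_cons, hx]; omega
    · have hm' : x ∈ win_nums := by simpa using hm
      rw [ih]; simp [List.countP_cons, hx, hm']; omega
    · have hm' : x ∉ win_nums := by simpa using hm
      rw [ih]; simp [List.countP_cons, hx, hm']

-- summing lottos.count(v) over a nodup list of the non-zero winners is the matched count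
theorem sum_count_eq_countP (L : List Int) (hnd : L.Nodup) (win_nums : List Int)
    (hmem : ∀ x, x ∈ L ↔ x ∈ win_nums ∧ x ≠ 0) (lottos : List Int) :
    (L.map (fun v => (lottos.count v : Int))).sum
      = (lottos.countP (fun x => x != 0 && win_nums.contains x) : Int) := by
  induction lottos with
  | nil => simp
  | cons x xs ih =>
    have hsplit : (L.map (fun v => ((x :: xs).count v : Int))).sum
        = (L.map (fun v => (xs.count v : Int))).sum
          + (L.map (fun v => if v = x then (1 : Int) else 0)).sum := by
      rw [← PySem.List.sum_map_add_int]
      refine congrArg List.sum (List.map_congr_left ?_)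
      intro v _
      rw [List.count_cons]
      by_cases hvx : v = x <;> simp [hvx] <;> omega
    have hsum : ∀ (L' : List Int),
        (L'.map (fun v => if v = x then (1 : Int) else 0)).sum = (L'.count x : Int) := by
      intro L'
      induction L' with
      | nil => simp
      | cons y ys ihy =>
        by_cases h : y = x <;> simp [List.count_cons, h, ihy] <;> omega
    have hone : (L.map (fun v => if v = x then (1 : Int) else 0)).sum
        = if x ∈ L then (1 : Int) else 0 := by
      rw [hsum]
      by_cases hx : x ∈ L
      · rw [List.count_eq_one_of_mem hnd hx, if_pos hx]; rfl
      · rw [List.count_eq_zero.2 hx, if_neg hx]; rfl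
    rw [hsplit, ih, hone, List.countP_cons]
    by_cases hx0 : x = 0
    · have hxL : x ∉ L := fun h => ((hmem x).1 h).2 hx0
      subst hx0; simp [hxL]
    · by_cases hxw : x ∈ win_nums
      · have hxL : x ∈ L := (hmem x).2 ⟨hxw, hx0⟩
        simp [hxL, hx0, hxw]
      · have hxL : x ∉ L := fun h => hxw ((hmem x).1 h).1
        simp [hxL, hx0, hxw]

-- the complement count: each lotto is a zero, a non-zero winner, or a loser
theorem length_split_losers (lottos : List Int) (win_nums : List Int) :
    lottos.length
      = lottos.countP (fun x => x == 0)
        + lottos.countP (fun x => x != 0 && win_nums.contains x)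
        + (lottos.filter (fun x => x ≠ 0 ∧ ¬ (PySem.Set.ofList win_nums).contains x)).length := by
  induction lottos with
  | nil => simp
  | cons x xs ih =>
    have hcw : ((PySem.Set.ofList win_nums).contains x = true) ↔ (x ∈ win_nums) := by
      simp [PySem.Set.mem_ofList]
    simp only [List.length_cons, List.countP_cons, List.filter_cons]
    by_cases hx : x = 0
    · subst hx; simp [ih]; omega
    · by_cases hw : x ∈ win_nums <;> simp [hx, hw, hcw, ih] <;> omega

-- the award table is the closed form on 0..6
theorem award_closed (m : Int) (h0 : 0 ≤ m) (h6 : m ≤ 6) :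
    (awardDict.get? m).getD 0 = min 6 (7 - m) := by
  interval_cases m <;> decide

-- B's matched fold equals the matched count
theorem alt_matches (lottos : List Int) (win_nums : List Int) :
    ((PySem.Set.ofList win_nums).filter (fun v => v ≠ 0)).foldl
        (fun acc v => acc + (PySem.List.count lottos v : Int)) 0
      = (lottos.countP (fun x => x != 0 && win_nums.contains x) : Int) := by
  have hfold : ∀ (L : List Int) (a : Int),
      L.foldl (fun acc v => acc + (PySem.List.count lottos v : Int)) a
        = a + (L.map (fun v => (lottos.count v : Int))).sum := by
    intro L
    induction L with
    | nil => simp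
    | cons v vs ih =>
      intro a
      rw [List.foldl_cons, ih]
      simp [PySem.List.count]
      ring
  rw [hfold]
  set L := (PySem.Set.ofList win_nums).filter (fun v => decide (v ≠ 0)) with hL
  have hnd : L.Nodup := List.Nodup.filter _ (PySem.Set.nodup_ofList win_nums)
  have hmem : ∀ x, x ∈ L ↔ x ∈ win_nums ∧ x ≠ 0 := by
    intro x
    simp [hL, List.mem_filter, PySem.Set.mem_ofList]
  rw [sum_count_eq_countP L hnd win_nums hmem lottos]
  omega

theorem solution_eq (lottos : List Int) (win_nums : List Int)
    (hp : Pre_solution lottos win_nums) :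
    solution lottos win_nums = solution_alt lottos win_nums := by
  unfold Pre_solution at hp
  have hsplit := length_split_losers lottos win_nums
  simp only [solution, solution_alt, solutionLoop_counts, alt_matches]
  set Z : Nat := lottos.countP (fun x => x == 0) with hZ
  set M : Nat := lottos.countP (fun x => x != 0 && win_nums.contains x) with hM
  set K : Nat := (lottos.filter
      (fun x => x ≠ 0 ∧ ¬ (PySem.Set.ofList win_nums).contains x)).length with hK
  have hlen : ((lottos.length : Int) - (K : Int)) = (Z : Int) + (M : Int) := by
    omega
  rw [hlen]
  have h1 : (awardDict.get? ((0:Int) + Z + (0 + M))).getD 0 = min 6 (7 - ((0:Int) + Z + (0 + M))) := by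
    apply award_closed <;> omega
  have h2 : (awardDict.get? ((0:Int) + M)).getD 0 = min 6 (7 - ((0:Int) + M)) := by
    apply award_closed <;> omega
  simp only [h1, h2]
  have harr : (0:Int) + ↑Z + (0 + ↑M) = ↑Z + ↑M := by ring
  rw [harr]
  norm_num

-- ===== VERDICT (by name: the statement is the Claim_ definition above) =====
theorem solution_spec : Claim_equal_solution := by
  intro lottos win_nums _ hp
  exact solution_eq lottos win_nums hp
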